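-- pv_equiv track=rewrite | github.com/jinyesong/Python | base/practice4/4.5_dataType.py | prg2com
-- ===== SOURCE A (Python) =====
-- def prg2com(inlist, coms):
--     outlist = []
--     sumout = []
--     for x in range(coms):
--         outlist.append([])
--         sumout.append(0)
--
--     inlist.sort(reverse=True)
--
--     for bread in inlist:
--         lowbasket = sumout.index(min(sumout))
--         outlist[lowbasket].append(bread)
--         sumout[lowbasket] += bread
--
--     return outlist
-- ===== SOURCE B (Python) =====
-- # Same greedy assignment, but instead of scanning all bin sums for min and
-- # index each round, keep a queue of (sum, bin_index) pairs in sorted order: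
-- # pop the front (smallest sum, then smallest index) and re-insert the updated
-- # pair at its ordered position.  Sorts inlist in place, like the original.
-- def _insort(queue, item):
--     k = 0
--     while k < len(queue) and queue[k] < item:
--         k += 1
--     queue.insert(k, item)
--
-- def prg2com(inlist, coms):
--     bins = [[] for _ in range(coms)]
--     queue = [(0, i) for i in range(coms)]
--
--     inlist.sort(reverse=True)
--
--     for bread in inlist:
--         s, i = queue.pop(0)
--         bins[i].append(bread)
--         _insort(queue, (s + bread, i))
--
--     return bins
-- ===== Notes on version B (the rewrite author's own statement) =====
-- stated objective: alternative
-- what changed: Instead of rescanning the whole sums list with min() and .index() for every item, B keeps a queue of (sum, bin-index) pairs in sorted order, pops the front for the least-loaded bin and re-inserts the updated pair at its ordered position.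
-- outside the precondition, e.g. on prg2com([1], 0): A raises ValueError, B raises IndexError
import Mathlib
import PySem

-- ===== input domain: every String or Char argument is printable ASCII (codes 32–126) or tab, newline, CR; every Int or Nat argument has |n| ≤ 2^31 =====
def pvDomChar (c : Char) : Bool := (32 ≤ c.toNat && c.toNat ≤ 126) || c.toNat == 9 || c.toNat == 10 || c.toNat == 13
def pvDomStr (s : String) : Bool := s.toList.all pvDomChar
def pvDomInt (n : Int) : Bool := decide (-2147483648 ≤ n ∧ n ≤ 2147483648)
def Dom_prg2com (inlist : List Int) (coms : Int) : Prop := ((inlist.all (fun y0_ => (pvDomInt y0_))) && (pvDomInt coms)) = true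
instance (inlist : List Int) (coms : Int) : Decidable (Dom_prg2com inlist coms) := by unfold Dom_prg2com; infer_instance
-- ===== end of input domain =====

-- B replaces A's per-item min+index scans over the bin sums by a queue of
-- (sum, bin-index) pairs kept in sorted order (pop front, reinsert in order);
-- both sort inlist in place — equivalence here is about the return value.

-- ===== PORT A =====
-- one loop turn of 'for bread in inlist' in A
def prg2comStepA (st : List (List Int) × List Int) (bread : Int) :
    List (List Int) × List Int :=
  -- sumout.index(min(sumout)); min([]) raises ValueError, excluded by Pre_
  let m := (PySem.List.min? st.2 (fun x => x)).getD 0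
  let low := (PySem.List.index? st.2 m).getD 0
  (st.1.set low ((st.1.getD low []) ++ [bread]),
   st.2.set low ((st.2.getD low 0) + bread))

def prg2com (inlist : List Int) (coms : Int) : List (List Int) :=
  -- for x in range(coms): outlist.append([]); sumout.append(0)
  let init := (PySem.List.pyRange 0 coms 1).foldl
    (fun (st : List (List Int) × List Int) _ => (st.1 ++ [[]], st.2 ++ [0]))
    ([], [])
  let srt := PySem.List.sorted inlist (fun x => x) true
  (srt.foldl prg2comStepA init).1

-- ===== PORT B =====
-- Python tuple comparison (s, i) < (s', i') (lexicographic on Int × Int)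
def pvLtPair (a b : Int × Int) : Bool := a.1 < b.1 || (a.1 == b.1 && a.2 < b.2)

-- _insort: linear scan past smaller items, insert before the first not-smaller
def pvInsort : List (Int × Int) → (Int × Int) → List (Int × Int)
  | [], it => [it]
  | q :: qs, it => if pvLtPair q it then q :: pvInsort qs it else it :: q :: qs

-- one loop turn of 'for bread in inlist' in B
def prg2comStepB (st : List (List Int) × List (Int × Int)) (bread : Int) :
    List (List Int) × List (Int × Int) :=
  match st.2 with
  | [] => st   -- queue.pop(0) raises IndexError, excluded by Pre_
  | (s, i) :: rest =>
      (st.1.set i.toNat ((st.1.getD i.toNat []) ++ [bread]),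
       pvInsort rest (s + bread, i))

def prg2com_alt (inlist : List Int) (coms : Int) : List (List Int) :=
  let bins := (PySem.List.pyRange 0 coms 1).map (fun _ => ([] : List Int))
  let queue := (PySem.List.pyRange 0 coms 1).map (fun i => ((0 : Int), i))
  let srt := PySem.List.sorted inlist (fun x => x) true
  (srt.foldl prg2comStepB (bins, queue)).1

-- ===== PRECONDITION & SPEC =====
-- Pre_ excludes coms < 1 with a non-empty inlist: there A raises ValueError
-- (min of the empty sums list) and B raises IndexError (pop from the empty queue).
def Pre_prg2com (inlist : List Int) (coms : Int) : Prop := 1 ≤ coms ∨ inlist = []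
instance (inlist : List Int) (coms : Int) : Decidable (Pre_prg2com inlist coms) := by
  unfold Pre_prg2com; infer_instance

def pvWitness_prg2com : List Int × Int := ([5, 3, 4, 1, 2], 2)

def Spec_prg2com (inlist : List Int) (coms : Int) (out : List (List Int)) : Prop :=
  out = prg2com_alt inlist coms
instance (inlist : List Int) (coms : Int) (out : List (List Int)) :
    Decidable (Spec_prg2com inlist coms out) := by unfold Spec_prg2com; infer_instance

-- ===== CLAIM (what is proved, stated in full; the proofs are below) =====
def Claim_equal_prg2com : Prop := ∀ (inlist : List Int) (coms : Int),
  Dom_prg2com inlist coms → Pre_prg2com inlist coms →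
  Spec_prg2com inlist coms (prg2com inlist coms)

-- ===== LEMMAS AND PROOFS =====

-- lexicographic ≤ on pairs (the negation of pvLtPair the other way round)
def pvLexLE (a b : Int × Int) : Prop := a.1 < b.1 ∨ (a.1 = b.1 ∧ a.2 ≤ b.2)

-- the (sum, index) pairs of a sums list, indices starting at k
def pvPairs (k : Int) : List Int → List (Int × Int)
  | [] => []
  | x :: xs => (x, k) :: pvPairs (k + 1) xs

theorem pvLexLE_total (a b : Int × Int) : pvLtPair a b = false → pvLexLE b a := by
  unfold pvLtPair pvLexLE
  rcases a with ⟨a1, a2⟩; rcases b with ⟨b1, b2⟩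
  simp; omega

theorem pvLexLE_of_lt (a b : Int × Int) : pvLtPair a b = true → pvLexLE a b := by
  unfold pvLtPair pvLexLE; rcases a with ⟨a1, a2⟩; rcases b with ⟨b1, b2⟩
  simp; omega

theorem pvLexLE_antisymm {a b : Int × Int} (h1 : pvLexLE a b) (h2 : pvLexLE b a) :
    a = b := by
  rcases a with ⟨a1, a2⟩; rcases b with ⟨b1, b2⟩
  unfold pvLexLE at *; simp at *; omega

theorem pvLexLE_trans {a b c : Int × Int} (h1 : pvLexLE a b) (h2 : pvLexLE b c) :
    pvLexLE a c := by
  rcases a with ⟨a1, a2⟩; rcases b with ⟨b1, b2⟩; rcases c with ⟨c1, c2⟩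
  unfold pvLexLE at *; omega

theorem pvInsort_perm (q : List (Int × Int)) (it : Int × Int) :
    (pvInsort q it).Perm (it :: q) := by
  induction q with
  | nil => simp [pvInsort]
  | cons a qs ih =>
      unfold pvInsort
      by_cases h : pvLtPair a it
      · simp only [h, if_true]
        exact ((ih.cons a).trans (List.Perm.swap it a qs))
      · simp [h]

theorem pvInsort_sorted (q : List (Int × Int)) (it : Int × Int)
    (hs : q.Pairwise pvLexLE) : (pvInsort q it).Pairwise pvLexLE := by
  induction q with
  | nil => simp [pvInsort]
  | cons a qs ih =>
      rcases List.pairwise_cons.mp hs with ⟨ha, hqs⟩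
      unfold pvInsort
      by_cases h : pvLtPair a it
      · simp only [h, if_true]
        refine List.pairwise_cons.mpr ⟨?_, ih hqs⟩
        intro y hy
        rcases List.mem_cons.mp ((pvInsort_perm qs it).mem_iff.mp hy) with h1 | h2
        · subst h1; exact pvLexLE_of_lt _ _ h
        · exact ha y h2
      · simp only [h, if_false, Bool.false_eq_true]
        refine List.pairwise_cons.mpr ⟨?_, hs⟩
        intro y hy
        have hia : pvLexLE it a := pvLexLE_total a it (by simpa using h)
        rcases List.mem_cons.mp hy with h1 | h2
        · subst h1; exact hia
        · exact pvLexLE_trans hia (ha y h2)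

theorem pvPairs_mem {so : List Int} {k : Int} {p : Int × Int}
    (h : p ∈ pvPairs k so) :
    ∃ idx : Nat, ∃ hidx : idx < so.length, p = (so[idx], k + idx) := by
  induction so generalizing k with
  | nil => simp [pvPairs] at h
  | cons x xs ih =>
      rcases List.mem_cons.mp h with h1 | h2
      · exact ⟨0, by simp, by simpa using h1⟩
      · rcases ih h2 with ⟨idx, hidx, hp⟩
        refine ⟨idx + 1, by simpa using Nat.succ_lt_succ hidx, ?_⟩
        simp [hp]; ring_nf

theorem pvPairs_getElem {so : List Int} {k : Int} {j : Nat} (hj : j < so.length) :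
    (pvPairs k so)[j]'(by
      induction so generalizing k j with
      | nil => simp at hj
      | cons x xs ih => cases j with
        | zero => simp [pvPairs]
        | succ j => simpa [pvPairs] using ih (by simpa using hj)) = (so[j], k + j) := by
  induction so generalizing k j with
  | nil => simp at hj
  | cons x xs ih =>
      cases j with
      | zero => simp [pvPairs]
      | succ j =>
          have := ih (k := k + 1) (j := j) (by simpa using hj)
          simp [pvPairs, this]; ring_nf

theorem pvPairs_length (k : Int) (so : List Int) :
    (pvPairs k so).length = so.length := by
  induction so generalizing k with
  | nil => rfl
  | cons x xs ih => simp [pvPairs, ih]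

theorem pvPairs_set {so : List Int} {j : Nat} (k : Int) (v : Int)
    (hj : j < so.length) :
    pvPairs k (so.set j v) = (pvPairs k so).set j (v, k + j) := by
  induction so generalizing k j with
  | nil => simp at hj
  | cons x xs ih =>
      cases j with
      | zero => simp [pvPairs]
      | succ j =>
          have := ih (by simpa using hj) (k := k + 1)
          simp [pvPairs, this]; ring_nf

theorem pvSet_perm {α : Type} (l : List α) (j : Nat) (a : α) (hj : j < l.length) :
    (l.set j a).Perm (a :: l.eraseIdx j) := by
  induction l generalizing j with
  | nil => simp at hj
  | cons x xs ih =>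
      cases j with
      | zero => simp
      | succ j =>
          have h := ih (j := j) (by simpa using hj)
          simp only [List.set_cons_succ, List.eraseIdx_cons_succ]
          exact (h.cons x).trans (List.Perm.swap a x _)

theorem pvCons_eraseIdx_perm {α : Type} (l : List α) (j : Nat) (hj : j < l.length) :
    l.Perm (l[j] :: l.eraseIdx j) := by
  have := pvSet_perm l j (l[j]) hj
  simpa using this

-- the head popped by B is exactly A's (min(sumout), sumout.index(min(sumout)))
theorem pvHead_eq {so : List Int} {q : List (Int × Int)} {s i : Int}
    {t : List (Int × Int)}
    (hperm : q.Perm (pvPairs 0 so)) (hsort : q.Pairwise pvLexLE)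
    (hq : q = (s, i) :: t) {m : Int} {j : Nat}
    (hmin : PySem.List.min? so (fun x => x) = some m)
    (hidx : PySem.List.index? so m = some j) :
    (s, i) = (m, (j : Int)) := by
  rcases PySem.List.getElem_of_index?_eq_some hidx with ⟨hjlen, hjv, hjfirst⟩
  have hmem_mj : ((m, (j : Int)) : Int × Int) ∈ pvPairs 0 so := by
    have := pvPairs_getElem (so := so) (k := 0) hjlen
    rw [hjv] at this
    have : (pvPairs 0 so)[j]'(by rw [pvPairs_length]; exact hjlen) = (m, (j:Int)) := by
      simpa using this
    exact this ▸ List.getElem_mem _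
  have hmin_all : ∀ p ∈ pvPairs 0 so, pvLexLE (m, (j : Int)) p := by
    intro p hp
    rcases pvPairs_mem hp with ⟨idx, hidxl, hpv⟩
    subst hpv
    have hmle : m ≤ so[idx] := PySem.List.min?_isMin hmin _ (List.getElem_mem _)
    by_cases he : so[idx] = m
    · right
      constructor
      · simpa [he]
      · simp only [zero_add]
        by_contra hlt
        push_neg at hlt
        have hij : idx < j := by exact_mod_cast hlt
        exact hjfirst idx hij he
    · left; simp; omega
  -- head of the sorted queue is ≤ every element of the multiset
  have hhd_mem : (s, i) ∈ pvPairs 0 so := hperm.mem_iff.mp (by simp [hq])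
  have hhd_le : pvLexLE (s, i) (m, (j : Int)) := by
    have hmj_mem_q : ((m, (j : Int)) : Int × Int) ∈ q := hperm.mem_iff.mpr hmem_mj
    rw [hq] at hmj_mem_q
    rcases List.mem_cons.mp hmj_mem_q with h1 | h2
    · rw [← h1]; right; simp
    · rw [hq] at hsort
      exact (List.pairwise_cons.mp hsort).1 _ h2
  exact pvLexLE_antisymm hhd_le (hmin_all _ hhd_mem)

-- main loop invariant: same bins, queue = sorted permutation of the sum pairs
theorem pvLoop_eq (xs : List Int) :
    ∀ (ol : List (List Int)) (so : List Int) (q : List (Int × Int)),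
    so ≠ [] → q.Perm (pvPairs 0 so) → q.Pairwise pvLexLE →
    (xs.foldl prg2comStepA (ol, so)).1 = (xs.foldl prg2comStepB (ol, q)).1 := by
  induction xs with
  | nil => intro ol so q _ _ _; rfl
  | cons bread xs ih =>
      intro ol so q hso hperm hsort
      -- A's head analysis
      have hmin_ne : PySem.List.min? so (fun x => x) ≠ none := by
        rw [Ne, PySem.List.min?_eq_none_iff]; exact hso
      rcases Option.ne_none_iff_exists'.mp hmin_ne with ⟨m, hm⟩
      have hmmem : m ∈ so := PySem.List.min?_mem hm
      have hidx_ne : PySem.List.index? so m ≠ none := by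
        rw [Ne, PySem.List.index?_eq_none_iff]; simpa
      rcases Option.ne_none_iff_exists'.mp hidx_ne with ⟨j, hj⟩
      rcases PySem.List.getElem_of_index?_eq_some hj with ⟨hjlen, hjv, _⟩
      -- B's queue is non-empty
      have hqne : q ≠ [] := by
        intro h
        rw [h] at hperm
        have := hperm.length_eq
        rw [pvPairs_length] at this
        exact hso (List.length_eq_zero_iff.mp this.symm)
      rcases q with _ | ⟨⟨s, i⟩, t⟩
      · exact absurd rfl hqne
      have hhead : ((s, i) : Int × Int) = (m, (j : Int)) :=
        pvHead_eq hperm hsort rfl hm hj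
      have hs : s = m := congrArg Prod.fst hhead
      have hi : i = (j : Int) := congrArg Prod.snd hhead
      -- unfold one step of each fold
      simp only [List.foldl_cons]
      have hstepA : prg2comStepA (ol, so) bread =
          (ol.set j ((ol.getD j []) ++ [bread]), so.set j (m + bread)) := by
        unfold prg2comStepA
        simp only [hm, hj, Option.getD_some]
        rw [show so.getD j 0 = so[j] from List.getD_eq_getElem _ _ hjlen, hjv]
      have hstepB : prg2comStepB (ol, (s, i) :: t) bread =
          (ol.set j ((ol.getD j []) ++ [bread]), pvInsort t (m + bread, (j : Int))) := by
        unfold prg2comStepB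
        simp only [hs, hi]
        simp
      rw [hstepA, hstepB]
      -- re-establish the invariant
      apply ih
      · intro h
        apply hso
        have hl := congrArg List.length h
        rw [List.length_set] at hl
        exact List.length_eq_zero_iff.mp hl
      · -- new queue permutes the pairs of the updated sums
        have h1 : pvPairs 0 (so.set j (m + bread)) =
            (pvPairs 0 so).set j (m + bread, (j : Int)) := by
          rw [pvPairs_set 0 (m + bread) hjlen]; norm_num
        rw [h1]
        have hjp : j < (pvPairs 0 so).length := by rw [pvPairs_length]; exact hjlen
        have h2 : ((pvPairs 0 so).set j (m + bread, (j : Int))).Perm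
            ((m + bread, (j : Int)) :: (pvPairs 0 so).eraseIdx j) :=
          pvSet_perm _ _ _ hjp
        have hpj : (pvPairs 0 so)[j]'hjp = (m, (j : Int)) := by
          have := pvPairs_getElem (so := so) (k := 0) hjlen
          rw [hjv] at this; simpa using this
        have h3 : (pvPairs 0 so).Perm ((m, (j : Int)) :: (pvPairs 0 so).eraseIdx j) := by
          have := pvCons_eraseIdx_perm (pvPairs 0 so) j hjp
          rwa [hpj] at this
        have ht : t.Perm ((pvPairs 0 so).eraseIdx j) := by
          have : ((s, i) :: t).Perm ((m, (j : Int)) :: (pvPairs 0 so).eraseIdx j) :=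
            hperm.trans h3
          rw [hhead] at this
          exact this.cons_inv
        exact (pvInsort_perm t _).trans ((ht.cons _).trans h2.symm)
      · exact pvInsort_sorted t _ (List.pairwise_cons.mp hsort).2

-- A's init loop produces (replicate n [], replicate n 0)
theorem pvInitA (l : List Int) (a : List (List Int)) (b : List Int) :
    l.foldl (fun (st : List (List Int) × List Int) _ => (st.1 ++ [[]], st.2 ++ [0]))
      (a, b) = (a ++ List.replicate l.length [], b ++ List.replicate l.length 0) := by
  induction l generalizing a b with
  | nil => simp
  | cons x xs ih =>
      simp only [List.foldl_cons, ih, List.length_cons, List.replicate_succ]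
      simp

theorem pvPairs_replicate (n : Nat) (k : Int) :
    pvPairs k (List.replicate n 0) =
      (List.range n).map (fun t : Nat => ((0 : Int), k + (t : Int))) := by
  induction n generalizing k with
  | zero => rfl
  | succ n ih =>
      rw [List.replicate_succ, List.range_succ_eq_map]
      simp only [pvPairs, ih, List.map_cons, List.map_map]
      simp only [Nat.cast_zero, add_zero]
      congr 1
      · apply List.map_congr_left
        intro t _
        simp [Function.comp]
        ring

theorem pvQueue0_eq (coms : Int) :
    (PySem.List.pyRange 0 coms 1).map (fun i => ((0 : Int), i)) =
      pvPairs 0 (List.replicate (coms - 0).toNat 0) := by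
  rw [PySem.List.pyRange_one, pvPairs_replicate, List.map_map]
  apply List.map_congr_left
  intro t _
  simp [Function.comp]

theorem pvQueue0_sorted (coms : Int) :
    ((PySem.List.pyRange 0 coms 1).map (fun i => ((0 : Int), i))).Pairwise pvLexLE := by
  have h := PySem.List.pairwise_lt_pyRange_one (a := 0) (b := coms)
  exact List.Pairwise.map _ (fun a b hab => Or.inr ⟨rfl, le_of_lt hab⟩) h

-- ===== VERDICT (by name: the statement is the Claim_ definition above) =====
theorem prg2com_spec : Claim_equal_prg2com := by
  unfold Claim_equal_prg2com
  intro inlist coms _ hpre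
  unfold Spec_prg2com prg2com prg2com_alt
  simp only []
  rw [pvInitA]
  simp only [List.nil_append, List.map_const']
  rcases hpre with hc | hnil
  · -- coms ≥ 1: the sums list is non-empty, run the loop invariant
    apply pvLoop_eq
    · have h1 : (0:Int) < coms := hc
      have h2 : 0 < (PySem.List.pyRange 0 coms 1).length := by
        rw [PySem.List.length_pyRange_one]; omega
      intro h
      rw [← List.length_eq_zero_iff, List.length_replicate] at h
      omega
    · rw [PySem.List.length_pyRange_one, ← pvQueue0_eq coms]
    · exact pvQueue0_sorted coms
  · subst hnil
    simp [PySem.List.sorted, List.map_const']
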